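-- pv_equiv track=rewrite | github.com/ArturSanin/Python_Code | Small_Projects/Wolfram_Challenges/aliquot_sequence/aliquot_sequence.py | aliquote_sequence
-- ===== SOURCE A (Python) =====
-- def aliquote_sequence(n):
--     """
--
--     :param n: Positive integer.
--     :return: List with the aliquote sequence of n up to 30 terms.
--     """
--
--     def proper_divisor(integer):
--         """
--
--         :param integer: Some integer.
--         :return: Returns a list of all proper divisors of integer.
--         """
--         proper_divisors_list = []
--         for i in range(integer - 1):
--             if integer % (i + 1) == 0:
--                 proper_divisors_list.append(i + 1)
--             else:
--                 continue
--         return proper_divisors_list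
--
--     def proper_divisor_sum(integer):
--         """
--
--         :param integer: Some integer.
--         :return: The sum of all proper divisors of integer.
--         """
--         proper_divisor_list = proper_divisor(integer)
--         proper_divisor_list_length = len(proper_divisor_list)
--         proper_divisor_sum_variable = 0
--         for i in range(proper_divisor_list_length):
--             proper_divisor_sum_variable = proper_divisor_sum_variable + proper_divisor_list[i]
--         return proper_divisor_sum_variable
--
--     if not isinstance(n, int):
--         raise ValueError("Your input must be a positive integer.")
--     elif not n >= 0:
--         raise ValueError("Your input must be a positive integer.")
--     elif n == 1:
--         return []
--     else:
--         aliquote_sequence_list = [n]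
--         m = n
--         while 1 < 2:
--             aliquote_sequence_list_length = len(aliquote_sequence_list)
--             proper_divisor_sum_v = proper_divisor_sum(m)
--             if aliquote_sequence_list_length > 30:
--                 break
--             elif m == proper_divisor_sum_v:
--                 break
--             elif proper_divisor_sum_v == 1:
--                 break
--             elif aliquote_sequence_list[aliquote_sequence_list_length - 2] == proper_divisor_sum_v:
--                 break
--             else:
--                 aliquote_sequence_list.append(proper_divisor_sum_v)
--                 m = proper_divisor_sum_v
--         return aliquote_sequence_list
-- ===== SOURCE B (Python) =====
-- def aliquote_sequence(n):
--     """
--     :param n: Positive integer.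
--     :return: List with the aliquote sequence of n up to 30 terms.
--     """
--     if not isinstance(n, int) or n < 0:
--         raise ValueError("Your input must be a positive integer.")
--     if n == 1:
--         return []
--
--     def proper_divisor_sum(m):
--         # O(sqrt(m)) by pairing each small divisor i with its cofactor m // i.
--         if m <= 1:
--             return 0
--         s = 1
--         i = 2
--         while i * i <= m:
--             if m % i == 0:
--                 j = m // i
--                 s += i
--                 if j != i:
--                     s += j
--             i += 1
--         return s
--
--     seq = [n]
--     m = n
--     while len(seq) <= 30:
--         s = proper_divisor_sum(m)
--         if s == m or s == 1 or (len(seq) >= 2 and seq[-2] == s):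
--             break
--         seq.append(s)
--         m = s
--     return seq
-- ===== Notes on version B (the rewrite author's own statement) =====
-- stated objective: faster
-- what changed: The proper-divisor sum is computed in O(sqrt(m)) by trial-dividing only up to sqrt(m) and adding each divisor together with its cofactor m//i, instead of building the full list of divisors by scanning 1..m-1 and then summing it by index; the sequence loop is kept but written directly with a length-bounded while.
import Mathlib
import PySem

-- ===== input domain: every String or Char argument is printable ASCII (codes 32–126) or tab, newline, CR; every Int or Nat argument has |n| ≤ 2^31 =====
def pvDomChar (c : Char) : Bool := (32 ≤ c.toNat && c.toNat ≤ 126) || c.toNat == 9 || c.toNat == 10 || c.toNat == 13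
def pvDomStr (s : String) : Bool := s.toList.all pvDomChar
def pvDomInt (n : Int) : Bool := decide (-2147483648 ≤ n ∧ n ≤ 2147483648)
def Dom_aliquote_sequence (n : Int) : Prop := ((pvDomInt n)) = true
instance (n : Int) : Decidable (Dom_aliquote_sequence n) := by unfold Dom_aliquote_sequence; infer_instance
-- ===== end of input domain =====

-- B replaces A's O(m) proper-divisor-sum (full 1..m-1 scan, then an index-summing pass) by an
-- O(sqrt m) paired trial division; the 30-term sequence loop is kept.

-- termination facts for the ports' while-loops (cited by name in decreasing_by)
theorem pv_dec_append (seq : List Int) (s : Int) (h : seq.length < 31) :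
    31 - (seq ++ [s]).length < 31 - seq.length := by
  rw [List.length_append, List.length_cons, List.length_nil]
  omega

theorem pv_dec_sqrt {m i : Int} (h : i * i ≤ m) : (m + 1 - (i + 1)).toNat < (m + 1 - i).toNat := by
  have hi : i ≤ m := by
    by_cases h0 : i ≤ 0
    · exact le_trans h0 (le_trans (mul_self_nonneg i) h)
    · exact le_trans (le_mul_of_one_le_left (by omega) (by omega)) h
  omega

-- ===== PORT A =====
def pv_proper_divisor (integer : Int) : List Int :=
  (PySem.List.pyRange 0 (integer - 1) 1).foldl
    (fun acc i => if PySem.Int.mod integer (i + 1) == 0 then acc ++ [i + 1] else acc) []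

def pv_proper_divisor_sum (integer : Int) : Int :=
  let lst := pv_proper_divisor integer
  (PySem.List.pyRange 0 (lst.length : Int) 1).foldl
    (fun s i => s + PySem.List.pyGetD lst i 0) 0

-- the while-loop of A; terminates because each non-break iteration appends (the length check breaks at 31)
def pv_loopA (seq : List Int) (m : Int) : List Int :=
  let L : Int := (seq.length : Int)
  let s := pv_proper_divisor_sum m
  if 30 < L then seq
  else if m == s then seq
  else if s == 1 then seq
  else if PySem.List.pyGetD seq (L - 2) 0 == s then seq
  else pv_loopA (seq ++ [s]) s
termination_by 31 - seq.length
decreasing_by exact pv_dec_append seq s (by simp_all; omega)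

def aliquote_sequence (n : Int) : List Int :=
  if n < 0 then []          -- A raises ValueError here (excluded by Pre_)
  else if n == 1 then []
  else pv_loopA [n] n

-- ===== PORT B =====
def pv_pds_fast_loop (m i s : Int) : Int :=
  if i * i ≤ m then
    let s' :=
      if PySem.Int.mod m i == 0 then
        let j := PySem.Int.floordiv m i
        let s1 := s + i
        if j != i then s1 + j else s1
      else s
    pv_pds_fast_loop m (i + 1) s'
  else s
termination_by (m + 1 - i).toNat
decreasing_by exact pv_dec_sqrt (by simp_all)

def pv_pdsum_fast (m : Int) : Int :=
  if m ≤ 1 then 0 else pv_pds_fast_loop m 2 1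

def pv_loopB (seq : List Int) (m : Int) : List Int :=
  if (seq.length : Int) ≤ 30 then
    let s := pv_pdsum_fast m
    if s == m || s == 1 || (decide (2 ≤ seq.length) && (PySem.List.pyGetD seq (-2) 0 == s)) then
      seq
    else pv_loopB (seq ++ [s]) s
  else seq
termination_by 31 - seq.length
decreasing_by exact pv_dec_append seq s (by simp_all; omega)

def aliquote_sequence_alt (n : Int) : List Int :=
  if n < 0 then []          -- B raises ValueError here (excluded by Pre_)
  else if n == 1 then []
  else pv_loopB [n] n

-- ===== PRECONDITION & SPEC =====
-- A raises ValueError for n < 0 (and for non-int input, outside the type convention); Pre_ keeps n ≥ 0.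
def Pre_aliquote_sequence (n : Int) : Prop := 0 ≤ n
instance (n : Int) : Decidable (Pre_aliquote_sequence n) := by unfold Pre_aliquote_sequence; infer_instance
def pvWitness_aliquote_sequence : Int := 12

def Spec_aliquote_sequence (n : Int) (out : List Int) : Prop := out = aliquote_sequence_alt n
instance (n : Int) (out : List Int) : Decidable (Spec_aliquote_sequence n out) := by unfold Spec_aliquote_sequence; infer_instance

-- ===== CLAIM (what is proved, stated in full; the proofs are below) =====
def Claim_equal_aliquote_sequence : Prop := ∀ (n : Int), Dom_aliquote_sequence n → Pre_aliquote_sequence n → Spec_aliquote_sequence n (aliquote_sequence n)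

-- ===== LEMMAS AND PROOFS =====

def pvProperSum (N : Nat) : Int := ∑ d ∈ Finset.Ico 1 N, if d ∣ N then (d : Int) else 0

-- ===== A side =====
theorem pvA_range_sum (N : Nat) : ∀ (M : Nat),
    (((List.range M).map (fun k : Nat => (k:Int))).filter
        (fun i => PySem.Int.mod (N:Int) (i + 1) == 0) |>.map (fun i => i + 1)).sum =
      ∑ d ∈ Finset.Ico 1 (M + 1), if d ∣ N then (d : Int) else 0 := by
  intro M
  induction M with
  | zero => simp
  | succ M ih =>
    rw [List.range_succ]
    simp only [List.map_append, List.filter_append, List.sum_append]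
    rw [ih, Finset.sum_Ico_succ_top (a := 1) (b := M + 1) (by omega)
      (fun d => if d ∣ N then (d:Int) else 0)]
    congr 1
    simp only [List.map_cons, List.map_nil]
    have hcast : ((M:Int) + 1) = ((M + 1 : Nat) : Int) := by push_cast; ring
    by_cases hd : (M + 1) ∣ N
    · have hcond : ((PySem.Int.mod (N:Int) ((M:Int) + 1) == 0)) = true := by
        rw [beq_iff_eq, hcast, PySem.Int.mod_eq_zero_iff_dvd]
        exact_mod_cast hd
      rw [List.filter_cons, if_pos hcond]
      simp only [List.filter_nil, List.map_cons, List.map_nil, List.sum_cons, List.sum_nil,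
        add_zero, if_pos hd]
      push_cast
      ring
    · have hcond : ((PySem.Int.mod (N:Int) ((M:Int) + 1) == 0)) = false := by
        rw [beq_eq_false_iff_ne]
        intro hcon
        rw [hcast, PySem.Int.mod_eq_zero_iff_dvd] at hcon
        exact hd (by exact_mod_cast hcon)
      rw [List.filter_cons, if_neg (by rw [hcond]; exact Bool.false_ne_true)]
      simp [hd]
theorem pv_pdsA_eq (m : Int) (hm : 0 ≤ m) : pv_proper_divisor_sum m = pvProperSum m.toNat := by
  obtain ⟨N, rfl⟩ : ∃ N : Nat, m = (N:Int) := ⟨m.toNat, by omega⟩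
  unfold pv_proper_divisor_sum pv_proper_divisor
  rw [PySem.List.foldl_pyRange_zero_pyGetD' _ 0 (fun s v => s + v) 0,
    PySem.List.foldl_add _ (fun v => v) 0]
  simp only [List.map_id_fun', id, zero_add]
  rw [PySem.List.foldl_append_if (fun i => PySem.Int.mod (N:Int) (i + 1) == 0) (fun i => i + 1)]
  rw [PySem.List.pyRange_zero ((N:Int) - 1), List.nil_append]
  have h1 : ((N:Int) - 1).toNat = N - 1 := by omega
  rw [h1, pvA_range_sum N (N - 1)]
  have h2 : ((N:Int)).toNat = N := by omega
  rw [h2]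
  unfold pvProperSum
  rcases Nat.eq_zero_or_pos N with h0 | hpos
  · subst h0; simp
  · have h3 : N - 1 + 1 = N := by omega
    rw [h3]

-- ===== B side =====
theorem pvB_loop_sum (N : Nat) : ∀ (k : Nat) (i s : Int), 2 ≤ i → N.sqrt + 1 - i.toNat ≤ k →
    pv_pds_fast_loop (N:Int) i s =
      s + ∑ d ∈ Finset.Ico i.toNat (N.sqrt + 1),
        (if d ∣ N then ((d:Int) + (if d * d ≠ N then ((N / d : Nat) : Int) else 0)) else 0) := by
  intro k
  induction k with
  | zero =>
    intro i s hi hk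
    rw [pv_pds_fast_loop]
    have hlt : ¬ i * i ≤ (N:Int) := by
      intro hle
      have h1 : i.toNat * i.toNat ≤ N := by
        have : ((i.toNat * i.toNat : Nat) : Int) ≤ (N:Int) := by push_cast; rw [Int.toNat_of_nonneg (by omega)]; exact hle
        exact_mod_cast this
      have := Nat.le_sqrt.mpr h1
      omega
    rw [if_neg hlt, Finset.Ico_eq_empty (by omega), Finset.sum_empty, add_zero]
  | succ k ih =>
    intro i s hi hk
    rw [pv_pds_fast_loop]
    by_cases hle : i * i ≤ (N:Int)
    · rw [if_pos hle]
      have hii : i = ((i.toNat : Nat) : Int) := by omega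
      have h1 : i.toNat * i.toNat ≤ N := by
        have : ((i.toNat * i.toNat : Nat) : Int) ≤ (N:Int) := by
          push_cast; rw [Int.toNat_of_nonneg (by omega)]; exact hle
        exact_mod_cast this
      have hsq : i.toNat ≤ N.sqrt := Nat.le_sqrt.mpr h1
      have hbot : i.toNat < N.sqrt + 1 := by omega
      rw [Finset.sum_eq_sum_Ico_succ_bot hbot]
      have htn : (i + 1).toNat = i.toNat + 1 := by omega
      by_cases hd : i.toNat ∣ N
      · have hmod : (PySem.Int.mod (N:Int) i == 0) = true := by
          rw [beq_iff_eq, hii, PySem.Int.mod_eq_zero_iff_dvd]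
          exact_mod_cast hd
        have hfd : PySem.Int.floordiv (N:Int) i = ((N / i.toNat : Nat) : Int) := by
          rw [hii]; exact PySem.Int.floordiv_natCast N i.toNat
        have hNd_eq : (N / i.toNat = i.toNat) ↔ (i.toNat * i.toNat = N) := by
          constructor
          · intro h
            calc i.toNat * i.toNat = N / i.toNat * i.toNat := by rw [h]
            _ = N := Nat.div_mul_cancel hd
          · intro h
            conv_lhs => rw [← h]
            exact Nat.mul_div_cancel_left i.toNat (by omega)
        rw [if_pos hmod, hfd]
        by_cases hne : N / i.toNat = i.toNat
        · have heq : (((N / i.toNat : Nat) : Int) != i) = false := by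
            rw [bne_eq_false_iff_eq]
            conv_rhs => rw [hii]
            exact_mod_cast hne
          rw [if_neg (by rw [heq]; exact Bool.false_ne_true)]
          rw [ih (i+1) (s + i) (by omega) (by omega), htn]
          rw [if_pos hd, if_neg (by omega : ¬ i.toNat * i.toNat ≠ N)]
          rw [← hii]
          ring
        · have heq : (((N / i.toNat : Nat) : Int) != i) = true := by
            rw [bne_iff_ne]
            intro hcon
            apply hne
            rw [hii] at hcon
            exact_mod_cast hcon
          rw [if_pos heq]
          rw [ih (i+1) (s + i + ((N / i.toNat : Nat) : Int)) (by omega) (by omega), htn]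
          rw [if_pos hd, if_pos (fun hcon => hne (hNd_eq.mpr hcon))]
          rw [← hii]
          ring
      · have hmod : (PySem.Int.mod (N:Int) i == 0) = false := by
          rw [beq_eq_false_iff_ne]
          intro hcon
          rw [hii, PySem.Int.mod_eq_zero_iff_dvd] at hcon
          exact hd (by exact_mod_cast hcon)
        rw [if_neg (by rw [hmod]; exact Bool.false_ne_true)]
        rw [ih (i+1) s (by omega) (by omega), htn, if_neg hd]
        ring
    · rw [if_neg hle]
      have hlt2 : N < i.toNat * i.toNat := by
        by_contra hcon
        push_neg at hcon
        apply hle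
        have h' : ((i.toNat * i.toNat : Nat):Int) ≤ ((N:Nat):Int) := by exact_mod_cast hcon
        have hc2 : ((i.toNat : Nat) : Int) = i := by omega
        calc i * i = ((i.toNat * i.toNat : Nat):Int) := by push_cast; rw [hc2]
          _ ≤ (N:Int) := h'
      have : N.sqrt < i.toNat := by
        rw [Nat.sqrt_lt']
        calc N < i.toNat * i.toNat := hlt2
          _ = i.toNat ^ 2 := by ring
      rw [Finset.Ico_eq_empty (by omega), Finset.sum_empty, add_zero]

-- ===== the pairing identity =====
theorem pvHelper_big (N a : Nat) (hN : 2 ≤ N) (h1 : N.sqrt < a) (h2 : a < N) (hd : a ∣ N) :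
    N / a ∣ N ∧ 2 ≤ N / a ∧ N / a * (N / a) < N := by
  obtain ⟨c, hc⟩ := hd
  have ha0 : 0 < a := by omega
  have hdiv : N / a = c := by rw [hc, Nat.mul_div_cancel_left c ha0]
  have haa : N < a * a := by
    have := Nat.sqrt_lt'.mp h1
    calc N < a ^ 2 := this
      _ = a * a := by ring
  have hca : c < a := by
    apply Nat.lt_of_mul_lt_mul_left (a := a)
    rw [← hc]
    exact haa
  have hc0 : 0 < c := by
    rcases Nat.eq_zero_or_pos c with h | h
    · subst h; omega
    · exact h
  refine ⟨?_, ?_, ?_⟩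
  · exact hdiv ▸ ⟨a, by rw [hc]; ring⟩
  · rw [hdiv]
    rcases Nat.lt_or_ge c 2 with h | h
    · interval_cases c <;> omega
    · exact h
  · rw [hdiv]
    calc c * c < c * a := by nlinarith
      _ = N := by rw [hc]; ring

theorem pvHelper_small (N e : Nat) (hN : 2 ≤ N) (h1 : 2 ≤ e) (h2 : e ≤ N.sqrt) (hd : e ∣ N)
    (hne : e * e ≠ N) : N / e ∣ N ∧ N.sqrt < N / e ∧ N / e < N := by
  obtain ⟨c, hc⟩ := hd
  have he0 : 0 < e := by omega
  have hdiv : N / e = c := by rw [hc, Nat.mul_div_cancel_left c he0]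
  have hee : e * e < N := by
    have hle : e * e ≤ N := by
      have := Nat.sqrt_le_sqrt (le_refl N)
      calc e * e = e ^ 2 := by ring
        _ ≤ N.sqrt ^ 2 := by exact Nat.pow_le_pow_left h2 2
        _ ≤ N := Nat.sqrt_le' N
    omega
  have hec : e < c := by
    apply Nat.lt_of_mul_lt_mul_left (a := e)
    rw [← hc]
    exact hee
  have hc0 : 0 < c := by omega
  refine ⟨?_, ?_, ?_⟩
  · exact hdiv ▸ ⟨e, by rw [hc]; ring⟩
  · rw [hdiv, Nat.sqrt_lt']
    calc N = e * c := hc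
      _ < c * c := by nlinarith
      _ = c ^ 2 := by ring
  · rw [hdiv, hc]
    calc c = 1 * c := by ring
      _ < e * c := by nlinarith

theorem pvPairing (N : Nat) (hN : 2 ≤ N) :
    pvProperSum N = 1 + ∑ d ∈ Finset.Ico 2 (N.sqrt + 1),
      (if d ∣ N then ((d:Int) + (if d * d ≠ N then ((N / d : Nat) : Int) else 0)) else 0) := by
  have hN0 : N ≠ 0 := by omega
  have hs1 : 1 ≤ N.sqrt := by
    have := Nat.sqrt_pos.mpr (show 0 < N by omega)
    omega
  have hsN : N.sqrt < N := Nat.sqrt_lt_self (by omega)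
  have hsplit : ∀ d : Nat,
      (if d ∣ N then ((d:Int) + (if d * d ≠ N then ((N / d : Nat) : Int) else 0)) else 0)
        = (if d ∣ N then (d:Int) else 0)
          + (if d ∣ N ∧ d * d ≠ N then ((N / d : Nat) : Int) else 0) := by
    intro d
    by_cases h1 : d ∣ N <;> by_cases h2 : d * d ≠ N <;> simp [h1, h2]
  rw [Finset.sum_congr rfl (fun d _ => hsplit d), Finset.sum_add_distrib]
  unfold pvProperSum
  rw [← Finset.sum_Ico_consecutive (fun d : Nat => if d ∣ N then (d:Int) else 0)
      (show 1 ≤ N.sqrt + 1 by omega) (show N.sqrt + 1 ≤ N by omega)]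
  rw [Finset.sum_eq_sum_Ico_succ_bot (show 1 < N.sqrt + 1 by omega)]
  rw [if_pos (one_dvd N)]
  have hbij : (∑ d ∈ Finset.Ico (N.sqrt + 1) N, if d ∣ N then (d:Int) else 0)
      = ∑ d ∈ Finset.Ico 2 (N.sqrt + 1), (if d ∣ N ∧ d * d ≠ N then ((N / d : Nat) : Int) else 0) := by
    rw [← Finset.sum_filter, ← Finset.sum_filter]
    refine Finset.sum_nbij' (fun d => N / d) (fun e => N / e) ?_ ?_ ?_ ?_ ?_
    · intro a ha
      simp only [Finset.mem_filter, Finset.mem_Ico] at ha ⊢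
      obtain ⟨⟨ha1, ha2⟩, hda⟩ := ha
      obtain ⟨q1, q2, q3⟩ := pvHelper_big N a hN (by omega) ha2 hda
      have hq4 : N / a ≤ N.sqrt := by
        by_contra hcon
        push_neg at hcon
        exfalso
        have hsq2 := Nat.sqrt_lt'.mp hcon
        have hlt : N < (N / a) * (N / a) := by
          calc N < (N / a) ^ 2 := hsq2
            _ = (N / a) * (N / a) := by ring
        omega
      exact ⟨⟨q2, by omega⟩, q1, by omega⟩
    · intro e he
      simp only [Finset.mem_filter, Finset.mem_Ico] at he ⊢
      obtain ⟨⟨he1, he2⟩, hde, hnee⟩ := he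
      obtain ⟨q1, q2, q3⟩ := pvHelper_small N e hN he1 (by omega) hde hnee
      exact ⟨⟨by omega, q3⟩, q1⟩
    · intro a ha
      simp only [Finset.mem_filter, Finset.mem_Ico] at ha
      exact Nat.div_div_self ha.2 hN0
    · intro e he
      simp only [Finset.mem_filter, Finset.mem_Ico] at he
      exact Nat.div_div_self he.2.1 hN0
    · intro a ha
      simp only [Finset.mem_filter, Finset.mem_Ico] at ha
      rw [Nat.div_div_self ha.2 hN0]
  rw [hbij, show (1:Nat) + 1 = 2 from rfl]
  push_cast
  ring

theorem pv_pdsB_eq (m : Int) (hm : 0 ≤ m) : pv_pdsum_fast m = pvProperSum m.toNat := by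
  obtain ⟨N, rfl⟩ : ∃ N : Nat, m = (N:Int) := ⟨m.toNat, by omega⟩
  have h2 : ((N:Int)).toNat = N := by omega
  rw [h2]
  unfold pv_pdsum_fast
  by_cases hm1 : (N:Int) ≤ 1
  · rw [if_pos hm1]
    unfold pvProperSum
    have hN01 : N = 0 ∨ N = 1 := by omega
    rcases hN01 with h | h <;> subst h <;> simp
  · rw [if_neg hm1]
    have hN : 2 ≤ N := by omega
    rw [pvB_loop_sum N (N.sqrt + 1) 2 1 (by omega) (by omega)]
    rw [pvPairing N hN]
    rw [show ((2:Int).toNat) = 2 from rfl]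

theorem pv_pdsA_nonneg (m : Int) (hm : 0 ≤ m) : 0 ≤ pv_proper_divisor_sum m := by
  rw [pv_pdsA_eq m hm]
  exact Finset.sum_nonneg (fun d _ => by split <;> positivity)

theorem pv_loop_eq_aux (k : Nat) : ∀ (seq : List Int) (m : Int), 31 - seq.length ≤ k → seq ≠ [] →
    seq.getLast? = some m → 0 ≤ m → pv_loopA seq m = pv_loopB seq m := by
  induction k with
  | zero =>
    intro seq m hk hne hlast hm
    rw [pv_loopA, pv_loopB]
    have h1 : ¬ ((seq.length:Int) ≤ 30) := by omega
    rw [if_neg h1, if_pos (show (30:Int) < (seq.length:Int) by omega)]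
  | succ k ih =>
    intro seq m hk hne hlast hm
    rw [pv_loopA, pv_loopB]
    rw [show pv_pdsum_fast m = pv_proper_divisor_sum m from by rw [pv_pdsB_eq m hm, pv_pdsA_eq m hm]]
    set s := pv_proper_divisor_sum m with hs
    by_cases hL : (seq.length : Int) ≤ 30
    · rw [if_pos hL, if_neg (by omega : ¬ (30:Int) < (seq.length:Int))]
      by_cases hms : m = s
      · simp [hms]
      · have hEq : (PySem.List.pyGetD seq ((seq.length:Int) - 2) 0 == s) =
            (decide (2 ≤ seq.length) && (PySem.List.pyGetD seq (-2) 0 == s)) := by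
          rcases seq with _ | ⟨a, tail⟩
          · simp at hne
          · rcases tail with _ | ⟨b, t2⟩
            · have ha : a = m := by simpa using hlast
              subst ha
              have e0 : PySem.List.pyGetD [a] (-1) 0 = a := by
                simpa using PySem.List.pyGetD_neg_one (xs := [a]) (d := 0) (by simp)
              simp [e0, hms]
            · have hlen : 2 ≤ (a :: b :: t2).length := by simp
              have hi0 : (0:Int) ≤ ((a :: b :: t2).length:Int) - 2 := by
                simp
                omega
              have hi1 : ((a :: b :: t2).length:Int) - 2 < ((a :: b :: t2).length:Int) := by
                omega
              have e1 : PySem.List.pyGetD (a :: b :: t2) (((a :: b :: t2).length:Int) - 2) 0 =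
                  (a :: b :: t2)[(a :: b :: t2).length - 2] := by
                rw [PySem.List.pyGetD_eq_getElem _ _ hi0 hi1]
                congr 1
                omega
              have e2 : PySem.List.pyGetD (a :: b :: t2) (-2) 0 =
                  (a :: b :: t2)[(a :: b :: t2).length - 2] :=
                PySem.List.pyGetD_neg_ofNat _ 2 0 (by omega) hlen
              rw [e1, e2]
              simp [hlen]
        rw [hEq]
        have hms' : (m == s) = false := by simpa using hms
        have hsm' : (s == m) = false := by simpa using fun h => hms h.symm
        by_cases hs1 : s = 1
        · simp [hs1]
        · have hs1' : (s == 1) = false := by simpa using hs1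
          by_cases hprev : (decide (2 ≤ seq.length) && (PySem.List.pyGetD seq (-2) 0 == s)) = true
          · simp [hprev, hms', hsm', hs1']
          · have hprev' : (decide (2 ≤ seq.length) && (PySem.List.pyGetD seq (-2) 0 == s)) = false :=
              Bool.not_eq_true _ ▸ (by simpa using hprev)
            simp only [hms', hsm', hs1', hprev', Bool.or_false, if_false, Bool.false_eq_true]
            exact ih (seq ++ [s]) s (by simp; omega) (by simp)
              (by simp) (hs ▸ pv_pdsA_nonneg m hm)
    · rw [if_neg hL, if_pos (by omega : (30:Int) < (seq.length:Int))]

theorem pv_loop_eq (seq : List Int) (m : Int) (hne : seq ≠ [])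
    (hlast : seq.getLast? = some m) (hm : 0 ≤ m) : pv_loopA seq m = pv_loopB seq m :=
  pv_loop_eq_aux 31 seq m (by omega) hne hlast hm

-- ===== VERDICT (by name: the statement is the Claim_ definition above) =====
theorem aliquote_sequence_spec : Claim_equal_aliquote_sequence := by
  intro n _ hpre
  unfold Spec_aliquote_sequence aliquote_sequence aliquote_sequence_alt
  have h0 : ¬ n < 0 := not_lt.mpr hpre
  simp only [if_neg h0]
  split
  · rfl
  · exact pv_loop_eq [n] n (by simp) (by simp) hpre
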